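-- pv_equiv track=rewrite | github.com/c0m4r/aurora | aurora/tools/file_edit_tool.py | _parse_edits
-- ===== SOURCE A (Python) =====
-- def _parse_edits(edits: str) -> list[tuple[str, str]]:
--     """Parse SEARCH/REPLACE blocks from the edits string."""
--     results = []
--     lines = edits.split("\n")
--     i = 0
--
--     while i < len(lines):
--         stripped = lines[i].strip()
--         if stripped == "<<<<<<< SEARCH":
--             # Collect SEARCH lines
--             search_lines = []
--             i += 1
--             while i < len(lines) and lines[i].strip() != "=======":
--                 search_lines.append(lines[i])
--                 i += 1
--
--             # Skip ======= separator
--             if i < len(lines):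
--                 i += 1  # skip '======='
--
--             # Collect REPLACE lines
--             replace_lines = []
--             while i < len(lines) and lines[i].strip() != ">>>>>>> REPLACE":
--                 replace_lines.append(lines[i])
--                 i += 1
--
--             # Skip >>>>>>> REPLACE marker
--             if i < len(lines):
--                 i += 1
--
--             # Reconstruct — preserve newlines
--             search_text = "\n".join(search_lines)
--             replace_text = "\n".join(replace_lines)
--
--             if search_text:
--                 results.append((search_text, replace_text))
--         else:
--             i += 1
--
--     return results
-- ===== SOURCE B (Python) =====
-- def _parse_edits(edits: str) -> list[tuple[str, str]]:
--     """Parse SEARCH/REPLACE blocks: one linear pass with a mode state machine."""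
--     results = []
--     mode = 0  # 0 = outside, 1 = collecting SEARCH, 2 = collecting REPLACE
--     search_acc = []
--     replace_acc = []
--
--     def flush():
--         search_text = "\n".join(search_acc)
--         if search_text:
--             results.append((search_text, "\n".join(replace_acc)))
--
--     for line in edits.split("\n"):
--         stripped = line.strip()
--         if mode == 0:
--             if stripped == "<<<<<<< SEARCH":
--                 mode = 1
--                 search_acc = []
--                 replace_acc = []
--         elif mode == 1:
--             if stripped == "=======":
--                 mode = 2
--             else:
--                 search_acc.append(line)
--         else:
--             if stripped == ">>>>>>> REPLACE":
--                 flush()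
--                 mode = 0
--             else:
--                 replace_acc.append(line)
--
--     if mode != 0:
--         flush()
--     return results
-- ===== Notes on version B (the rewrite author's own statement) =====
-- stated objective: alternative
-- what changed: Replaced the index-driven outer loop with two nested inner collection loops by a single fold over the lines driven by an explicit mode state machine (outside/search/replace) with accumulators and an end-of-input flush.
import Mathlib
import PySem

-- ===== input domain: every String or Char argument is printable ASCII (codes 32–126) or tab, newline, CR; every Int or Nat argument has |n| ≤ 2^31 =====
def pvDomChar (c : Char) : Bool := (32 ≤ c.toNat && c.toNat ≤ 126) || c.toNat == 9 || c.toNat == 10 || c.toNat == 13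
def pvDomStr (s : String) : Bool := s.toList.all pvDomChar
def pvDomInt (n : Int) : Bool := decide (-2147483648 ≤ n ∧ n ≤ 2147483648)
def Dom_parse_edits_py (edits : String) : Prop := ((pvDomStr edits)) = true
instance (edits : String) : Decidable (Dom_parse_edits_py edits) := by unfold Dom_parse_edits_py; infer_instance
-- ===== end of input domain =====

-- B replaces A's index-driven outer loop with two nested collection loops by a single fold with a mode state machine; same cost, different decomposition.

-- edits.split("\n")  ("\n" ≠ "", so split? is always some; exact)
def pvLines (edits : String) : List String := (PySem.Str.split? edits "\n").getD []

-- ===== PORT A =====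
-- inner 'while i < len(lines) and lines[i].strip() != marker' loop: (collected lines, rest starting at the marker if reached)
def pvCollectA (marker : String) : List String → List String × List String
  | [] => ([], [])
  | l :: rest =>
    if PySem.Str.strip l == marker then ([], l :: rest)
    else
      let p := pvCollectA marker rest
      (l :: p.1, p.2)

theorem pvCollectA_len (marker : String) (ls : List String) :
    (pvCollectA marker ls).2.length ≤ ls.length := by
  induction ls with
  | nil => simp [pvCollectA]
  | cons l rest ih =>
    simp only [pvCollectA]
    split
    · simp
    · simpa using Nat.le_succ_of_le ih

theorem pvTailLen {α : Type} (ls : List α) : ls.tail.length ≤ ls.length := by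
  cases ls <;> simp

-- outer 'while i < len(lines)' loop of A
def pvOuterA : List String → List (String × String)
  | [] => []
  | l :: rest =>
    if PySem.Str.strip l == "<<<<<<< SEARCH" then
      let p1 := pvCollectA "=======" rest
      let r2 := p1.2.tail          -- 'if i < len(lines): i += 1' (skip '======='); tail [] = []
      let p2 := pvCollectA ">>>>>>> REPLACE" r2
      let r4 := p2.2.tail          -- skip '>>>>>>> REPLACE' if present
      let s := PySem.Str.join "\n" p1.1
      let rp := PySem.Str.join "\n" p2.1
      if s == "" then pvOuterA r4 else (s, rp) :: pvOuterA r4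
    else pvOuterA rest
termination_by ls => ls.length
decreasing_by
  all_goals
    (have h1 := pvTailLen (pvCollectA ">>>>>>> REPLACE" (pvCollectA "=======" rest).2.tail).2;
     have h2 := pvCollectA_len ">>>>>>> REPLACE" (pvCollectA "=======" rest).2.tail;
     have h3 := pvTailLen (pvCollectA "=======" rest).2;
     have h4 := pvCollectA_len "=======" rest;
     simp only [List.length_cons, List.length_tail] at *;
     omega)

def parse_edits_py (edits : String) : List (String × String) :=
  pvOuterA (pvLines edits)

-- ===== PORT B =====
-- state: (mode, search_acc, replace_acc, results)
def pvEmitB (sa ra : List String) (res : List (String × String)) : List (String × String) :=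
  let s := PySem.Str.join "\n" sa
  if s == "" then res else res ++ [(s, PySem.Str.join "\n" ra)]

def pvStepB (st : Nat × List String × List String × List (String × String)) (line : String) :
    Nat × List String × List String × List (String × String) :=
  match st with
  | (mode, sa, ra, res) =>
    let stripped := PySem.Str.strip line
    if mode == 0 then
      if stripped == "<<<<<<< SEARCH" then (1, [], [], res) else (0, sa, ra, res)
    else if mode == 1 then
      if stripped == "=======" then (2, sa, ra, res) else (1, sa ++ [line], ra, res)
    else
      if stripped == ">>>>>>> REPLACE" then (0, sa, ra, pvEmitB sa ra res)
      else (2, sa, ra ++ [line], res)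

def pvFlushB (st : Nat × List String × List String × List (String × String)) :
    List (String × String) :=
  match st with
  | (mode, sa, ra, res) => if mode == 0 then res else pvEmitB sa ra res

def parse_edits_py_alt (edits : String) : List (String × String) :=
  pvFlushB ((pvLines edits).foldl pvStepB (0, [], [], []))

-- ===== PRECONDITION & SPEC =====
def Spec_parse_edits_py (edits : String) (out : List (String × String)) : Prop := out = parse_edits_py_alt edits
instance (edits : String) (out : List (String × String)) : Decidable (Spec_parse_edits_py edits out) := by unfold Spec_parse_edits_py; infer_instance

-- ===== CLAIM (what is proved, stated in full; the proofs are below) =====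
def Claim_equal_parse_edits_py : Prop := ∀ (edits : String), Dom_parse_edits_py edits → Spec_parse_edits_py edits (parse_edits_py edits)

-- ===== LEMMAS AND PROOFS =====

-- from mode 2, the fold collects replace lines up to '>>>>>>> REPLACE' exactly like A's inner loop
theorem pvFold_mode2 (ls : List String) : ∀ (sa ra : List String) (res : List (String × String)),
    List.foldl pvStepB (2, sa, ra, res) ls =
      match (pvCollectA ">>>>>>> REPLACE" ls).2 with
      | [] => (2, sa, ra ++ (pvCollectA ">>>>>>> REPLACE" ls).1, res)
      | _ :: rest =>
          List.foldl pvStepB (0, sa, ra ++ (pvCollectA ">>>>>>> REPLACE" ls).1,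
            pvEmitB sa (ra ++ (pvCollectA ">>>>>>> REPLACE" ls).1) res) rest := by
  induction ls with
  | nil => intro sa ra res; simp [pvCollectA]
  | cons l rest ih =>
    intro sa ra res
    by_cases h : PySem.Str.strip l == ">>>>>>> REPLACE"
    · simp [pvCollectA, h, pvStepB]
    · simp only [pvCollectA, h, if_false, Bool.false_eq_true, List.foldl_cons]
      have hstep : pvStepB (2, sa, ra, res) l = (2, sa, ra ++ [l], res) := by
        simp [pvStepB, h]
      rw [hstep, ih]
      simp [List.append_assoc]

-- from mode 1, the fold collects search lines up to '=======' exactly like A's inner loop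
theorem pvFold_mode1 (ls : List String) : ∀ (sa ra : List String) (res : List (String × String)),
    List.foldl pvStepB (1, sa, ra, res) ls =
      match (pvCollectA "=======" ls).2 with
      | [] => (1, sa ++ (pvCollectA "=======" ls).1, ra, res)
      | _ :: rest =>
          List.foldl pvStepB (2, sa ++ (pvCollectA "=======" ls).1, ra, res) rest := by
  induction ls with
  | nil => intro sa ra res; simp [pvCollectA]
  | cons l rest ih =>
    intro sa ra res
    by_cases h : PySem.Str.strip l == "======="
    · simp [pvCollectA, h, pvStepB]
    · simp only [pvCollectA, h, if_false, Bool.false_eq_true, List.foldl_cons]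
      have hstep : pvStepB (1, sa, ra, res) l = (1, sa ++ [l], ra, res) := by
        simp [pvStepB, h]
      rw [hstep, ih]
      simp [List.append_assoc]

theorem pvEmitB_cons (sa ra : List String) (res X : List (String × String)) :
    res ++ (if PySem.Str.join "\n" sa == "" then X
            else (PySem.Str.join "\n" sa, PySem.Str.join "\n" ra) :: X) =
    pvEmitB sa ra res ++ X := by
  unfold pvEmitB
  by_cases h : PySem.Str.join "\n" sa = "" <;> simp [h]

-- main invariant: from mode 0, flushing the fold appends exactly A's outer-loop output
theorem pvMain : ∀ (n : Nat) (ls : List String), ls.length ≤ n →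
    ∀ (sa ra : List String) (res : List (String × String)),
      pvFlushB (List.foldl pvStepB (0, sa, ra, res) ls) = res ++ pvOuterA ls := by
  intro n
  induction n with
  | zero =>
    intro ls hls sa ra res
    have : ls = [] := List.eq_nil_of_length_eq_zero (Nat.le_zero.mp hls)
    subst this; simp [pvFlushB, pvOuterA]
  | succ n ih =>
    intro ls hls sa ra res
    match ls with
    | [] => simp [pvFlushB, pvOuterA]
    | l :: rest =>
      have hrest : rest.length ≤ n := by simpa using Nat.lt_succ_iff.mp (Nat.lt_of_lt_of_le (by simp) hls)
      by_cases h : PySem.Str.strip l == "<<<<<<< SEARCH"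
      · simp only [List.foldl_cons]
        have hstep : pvStepB (0, sa, ra, res) l = (1, [], [], res) := by simp [pvStepB, h]
        rw [hstep, pvFold_mode1, pvOuterA]
        simp only [h, if_true]
        rcases hp1 : (pvCollectA "=======" rest).2 with _ | ⟨m, rest2⟩
        · -- EOF inside SEARCH: A joins with empty replace; B flushes in mode 1
          dsimp only [List.tail_nil, pvFlushB]
          simp only [pvCollectA, List.nil_append]
          simp_all [pvEmitB, pvOuterA, PySem.Str.join]
          split <;> simp
        · dsimp only [List.tail_cons]
          rw [pvFold_mode2]
          rcases hp2 : (pvCollectA ">>>>>>> REPLACE" rest2).2 with _ | ⟨m2, rest3⟩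
          · -- EOF inside REPLACE: B flushes in mode 2
            dsimp only [List.tail_nil, pvFlushB]
            simp only [List.nil_append]
            simp_all [pvEmitB, pvOuterA]
            split <;> simp
          · -- full block: both continue after the '>>>>>>> REPLACE' marker
            have hr3 : rest3.length ≤ n := by
              have h1 : rest3.length < rest2.length := by
                have := pvCollectA_len ">>>>>>> REPLACE" rest2
                rw [hp2] at this; simpa using Nat.lt_of_lt_of_le (by simp) this
              have h2 : rest2.length < rest.length := by
                have := pvCollectA_len "=======" rest
                rw [hp1] at this; simpa using Nat.lt_of_lt_of_le (by simp) this
              omega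
            dsimp only [List.tail_cons]
            rw [ih rest3 hr3]
            simp only [List.nil_append]
            rw [pvEmitB_cons]
      · simp only [List.foldl_cons]
        have hstep : pvStepB (0, sa, ra, res) l = (0, sa, ra, res) := by simp [pvStepB, h]
        rw [hstep, ih rest hrest, pvOuterA]
        simp [h]

-- ===== VERDICT (by name: the statement is the Claim_ definition above) =====
theorem parse_edits_py_spec : Claim_equal_parse_edits_py := by
  intro edits _
  unfold Spec_parse_edits_py parse_edits_py parse_edits_py_alt
  rw [pvMain (pvLines edits).length (pvLines edits) (le_refl _)]
  simp
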